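-- pv_equiv track=rewrite | github.com/akash1997/orbi | be/services/transcription.py | get_transcript_by_speaker
-- ===== SOURCE A (Python) =====
-- from typing import List, Dict, Any
--
-- def get_transcript_by_speaker(
--
--     segments: List[Dict[str, Any]]
-- ) -> Dict[str, str]:
--     """
--     Get concatenated transcript for each speaker.
--
--     Args:
--         segments: List of segments with 'speaker_id' and 'transcription'
--
--     Returns:
--         Dictionary mapping speaker_id to their full transcript
--     """
--     speaker_transcripts = {}
--
--     for segment in segments:
--         speaker_id = segment.get('speaker_id')
--         transcription = segment.get('transcription', '').strip()
--
--         if speaker_id and transcription: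
--             if speaker_id not in speaker_transcripts:
--                 speaker_transcripts[speaker_id] = []
--             speaker_transcripts[speaker_id].append(transcription)
--
--     # Join all transcripts for each speaker
--     return {
--         speaker_id: " ".join(transcripts)
--         for speaker_id, transcripts in speaker_transcripts.items()
--     }
-- ===== SOURCE B (Python) =====
-- def get_transcript_by_speaker(segments):
--     """Staged: flatten to (speaker, text) pairs, then build the result per distinct
--     speaker (first-appearance order) by joining that speaker's texts."""
--     pairs = []
--     for segment in segments:
--         speaker_id = segment.get('speaker_id')
--         transcription = segment.get('transcription', '').strip()
--         if speaker_id and transcription: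
--             pairs.append((speaker_id, transcription))
--     return {
--         sid: " ".join(t for s, t in pairs if s == sid)
--         for sid in dict.fromkeys(s for s, _ in pairs)
--     }
-- ===== Notes on version B (the rewrite author's own statement) =====
-- stated objective: alternative
-- what changed: B replaces A's incremental dict-of-fragment-lists fold followed by a join pass with a staged pipeline: flatten the segments to a (speaker, text) pair list, dedup the speakers in first-appearance order, then build each speaker's transcript by one filter-and-join pass over the pairs.
import Mathlib
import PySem

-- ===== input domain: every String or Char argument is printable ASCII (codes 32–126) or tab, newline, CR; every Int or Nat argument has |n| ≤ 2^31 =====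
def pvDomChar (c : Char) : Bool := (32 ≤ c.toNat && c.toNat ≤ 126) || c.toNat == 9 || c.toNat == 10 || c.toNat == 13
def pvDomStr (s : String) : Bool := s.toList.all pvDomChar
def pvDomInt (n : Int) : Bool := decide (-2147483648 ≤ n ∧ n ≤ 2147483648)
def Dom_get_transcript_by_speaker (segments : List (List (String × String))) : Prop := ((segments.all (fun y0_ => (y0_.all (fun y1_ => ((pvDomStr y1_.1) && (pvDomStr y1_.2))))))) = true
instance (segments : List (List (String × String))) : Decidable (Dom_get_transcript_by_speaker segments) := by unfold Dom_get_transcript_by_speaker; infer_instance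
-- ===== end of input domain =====

-- B replaces A's incremental dict-of-lists fold + join pass with a staged pipeline:
-- flatten to (speaker, text) pairs, dedup speakers (first appearance), then one
-- filter-and-join pass per speaker. Objective: alternative (same exact result).

-- ===== PORT A =====
-- each segment dict is an association list; segment.get(k) = first match (List.lookup)
def get_transcript_by_speaker (segments : List (List (String × String))) : List (String × String) :=
  let speaker_transcripts : PySem.Dict String (List String) :=
    segments.foldl (fun speaker_transcripts segment =>
      let speaker_id := (segment.lookup "speaker_id").getD ""
      let transcription := PySem.Str.strip ((segment.lookup "transcription").getD "")
      if speaker_id ≠ "" ∧ transcription ≠ "" then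
        let d := if speaker_transcripts.contains speaker_id then speaker_transcripts
                 else speaker_transcripts.insert speaker_id []
        d.modify speaker_id [] (fun ts => ts ++ [transcription])
      else speaker_transcripts) PySem.Dict.empty
  speaker_transcripts.items.map (fun p => (p.1, PySem.Str.join " " p.2))

-- ===== PORT B =====
def get_transcript_by_speaker_alt (segments : List (List (String × String))) : List (String × String) :=
  let pairs : List (String × String) :=
    segments.filterMap (fun segment =>
      let speaker_id := (segment.lookup "speaker_id").getD ""
      let transcription := PySem.Str.strip ((segment.lookup "transcription").getD "")
      if speaker_id ≠ "" ∧ transcription ≠ "" then some (speaker_id, transcription) else none)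
  -- dict.fromkeys(...) iterated = first occurrences in order = PySem.List.dedup
  (PySem.List.dedup (pairs.map Prod.fst)).map (fun sid =>
    (sid, PySem.Str.join " " ((pairs.filter (fun q => q.1 == sid)).map Prod.snd)))

-- ===== PRECONDITION & SPEC =====
-- A is total (segment.get never raises): no Pre_ needed; the claim covers every input.
def Spec_get_transcript_by_speaker (segments : List (List (String × String))) (out : List (String × String)) : Prop := out = get_transcript_by_speaker_alt segments
instance (segments : List (List (String × String))) (out : List (String × String)) : Decidable (Spec_get_transcript_by_speaker segments out) := by unfold Spec_get_transcript_by_speaker; infer_instance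

-- ===== CLAIM (what is proved, stated in full; the proofs are below) =====
def Claim_equal_get_transcript_by_speaker : Prop := ∀ (segments : List (List (String × String))), Dom_get_transcript_by_speaker segments → Spec_get_transcript_by_speaker segments (get_transcript_by_speaker segments)

-- ===== LEMMAS AND PROOFS =====

-- the pair a valid segment contributes (B's filterMap step)
def pairOf (segment : List (String × String)) : Option (String × String) :=
  let speaker_id := (segment.lookup "speaker_id").getD ""
  let transcription := PySem.Str.strip ((segment.lookup "transcription").getD "")
  if speaker_id ≠ "" ∧ transcription ≠ "" then some (speaker_id, transcription) else none

-- A's loop body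
def stepA (d : PySem.Dict String (List String)) (segment : List (String × String)) :
    PySem.Dict String (List String) :=
  let speaker_id := (segment.lookup "speaker_id").getD ""
  let transcription := PySem.Str.strip ((segment.lookup "transcription").getD "")
  if speaker_id ≠ "" ∧ transcription ≠ "" then
    let d' := if d.contains speaker_id then d else d.insert speaker_id []
    d'.modify speaker_id [] (fun ts => ts ++ [transcription])
  else d

-- the canonical modify-append step the PySem grouping lemmas speak about
def mstep (d : PySem.Dict String (List String)) (p : String × String) :
    PySem.Dict String (List String) :=
  d.modify p.1 [] (fun ts => ts ++ [p.2])

theorem stepA_eq_mstep (d : PySem.Dict String (List String)) (segment : List (String × String)) :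
    stepA d segment = match pairOf segment with
      | some p => mstep d p
      | none => d := by
  unfold stepA pairOf mstep
  set sid := (segment.lookup "speaker_id").getD ""
  set tr := PySem.Str.strip ((segment.lookup "transcription").getD "")
  by_cases hg : sid ≠ "" ∧ tr ≠ ""
  · rw [if_pos hg, if_pos hg]
    by_cases hc : d.contains sid = true
    · simp only [hc, if_true]
    · have hc' : d.contains sid = false := by simpa using hc
      simp only [hc', Bool.false_eq_true, if_false]
      show (d.insert sid []).modify sid [] _ = d.modify sid [] _
      have h1 : (d.insert sid []).modify sid [] (fun ts => ts ++ [tr])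
          = (d.insert sid []).insert sid (((d.insert sid []).getD sid []) ++ [tr]) := rfl
      have h2 : d.modify sid [] (fun ts => ts ++ [tr])
          = d.insert sid ((d.getD sid []) ++ [tr]) := rfl
      rw [h1, h2, PySem.Dict.getD_insert_self, PySem.Dict.insert_insert_self,
        PySem.Dict.getD_of_not_contains d [] hc']
  · rw [if_neg hg, if_neg hg]

theorem foldl_stepA_eq (segments : List (List (String × String)))
    (d : PySem.Dict String (List String)) :
    segments.foldl stepA d = (segments.filterMap pairOf).foldl mstep d := by
  induction segments generalizing d with
  | nil => rfl
  | cons seg rest ih =>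
    rw [List.foldl_cons, List.filterMap_cons, stepA_eq_mstep]
    cases h : pairOf seg with
    | none => exact ih d
    | some p => rw [List.foldl_cons]; exact ih (mstep d p)

-- ===== VERDICT (by name: the statement is the Claim_ definition above) =====
theorem get_transcript_by_speaker_spec : Claim_equal_get_transcript_by_speaker := by
  intro segments _
  unfold Spec_get_transcript_by_speaker
  have hA : get_transcript_by_speaker segments =
      (segments.foldl stepA PySem.Dict.empty).items.map
        (fun p => (p.1, PySem.Str.join " " p.2)) := rfl
  set pairs := segments.filterMap pairOf with hpairs
  have hB : get_transcript_by_speaker_alt segments =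
      (PySem.List.dedup (pairs.map Prod.fst)).map (fun sid =>
        (sid, PySem.Str.join " " ((pairs.filter (fun q => q.1 == sid)).map Prod.snd))) := rfl
  set dA := segments.foldl stepA PySem.Dict.empty with hdA
  have hfold : dA = pairs.foldl (fun d p => d.modify p.1 [] (fun ts => ts ++ [p.2])) PySem.Dict.empty := by
    rw [hdA, foldl_stepA_eq segments]; rfl
  have hnd : dA.keys.Nodup := by
    rw [hfold]
    exact PySem.Dict.nodup_keys_foldl_modify_key pairs Prod.fst []
      (fun d p => fun ts => ts ++ [p.2]) PySem.Dict.empty PySem.Dict.nodup_keys_empty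
  have hkeys : dA.keys = PySem.Set.ofList (pairs.map Prod.fst) := by
    rw [hfold]
    have := PySem.Dict.keys_foldl_modify_key (l := pairs) (key := Prod.fst) (d0 := ([] : List String))
      (f := fun d p => fun ts => ts ++ [p.2]) (d := (PySem.Dict.empty : PySem.Dict String (List String)))
    rw [this, PySem.Dict.keys_empty, PySem.Set.update_nil_left]
  have hgetD : ∀ k : String, dA.getD k [] = (pairs.filter (fun q => q.1 == k)).map Prod.snd := by
    intro k
    rw [hfold]
    have := PySem.Dict.getD_foldl_modify_append (l := pairs) (c := k)
      (d := (PySem.Dict.empty : PySem.Dict String (List String)))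
    simpa [PySem.Dict.getD_empty] using this
  have hitems : dA.items = dA.keys.map (fun k => (k, dA.getD k [])) :=
    PySem.Dict.items_eq_map_keys dA hnd []
  rw [hA, hB, hitems, hkeys, List.map_map, PySem.List.dedup_eq_ofList]
  apply List.map_congr_left
  intro k _
  simp only [Function.comp]
  rw [hgetD k]
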